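-- pv_equiv track=rewrite | github.com/grunsab/PieBot_v1 | organize_games_by_elo.py | categorize_game
-- ===== SOURCE A (Python) =====
-- ELO_RANGES = {
--     'beginner': (750, 1500),      # Stage 1: Basic piece values and tactics
--     'intermediate': (1500, 2400),  # Stage 2: Positional understanding
--     'expert': (2400, 3000),        # Stage 3: Strong human and titled players
--     'computer': (3000, 4000)       # Stage 4: Computer chess engines
-- }
--
-- def categorize_game(avg_rating):
--     """Determine which category a game belongs to based on average rating."""
--     if avg_rating is None:
--         return None
--
--     for category, (min_elo, max_elo) in ELO_RANGES.items():
--         if min_elo <= avg_rating < max_elo: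
--             return category
--
--     # If above all ranges, put in expert category
--     if avg_rating >= ELO_RANGES['expert'][0]:
--         return 'expert'
--
--     return None
-- ===== SOURCE B (Python) =====
-- BOUNDARIES = [750, 1500, 2400, 3000, 4000]
-- CATEGORIES = [None, 'beginner', 'intermediate', 'expert', 'computer', 'expert']
--
-- def categorize_game(avg_rating):
--     """Determine which category a game belongs to based on average rating."""
--     if avg_rating is None:
--         return None
--     lo, hi = 0, len(BOUNDARIES)
--     while lo < hi:
--         mid = (lo + hi) // 2
--         if avg_rating < BOUNDARIES[mid]:
--             hi = mid
--         else:
--             lo = mid + 1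
--     return CATEGORIES[lo]
-- ===== Notes on version B (the rewrite author's own statement) =====
-- stated objective: alternative
-- what changed: Replaces the linear scan over the range dict plus an 'expert' fallback by a hand-rolled bisect_right binary search over a sorted boundary list indexing a parallel category table.
import Mathlib
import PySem

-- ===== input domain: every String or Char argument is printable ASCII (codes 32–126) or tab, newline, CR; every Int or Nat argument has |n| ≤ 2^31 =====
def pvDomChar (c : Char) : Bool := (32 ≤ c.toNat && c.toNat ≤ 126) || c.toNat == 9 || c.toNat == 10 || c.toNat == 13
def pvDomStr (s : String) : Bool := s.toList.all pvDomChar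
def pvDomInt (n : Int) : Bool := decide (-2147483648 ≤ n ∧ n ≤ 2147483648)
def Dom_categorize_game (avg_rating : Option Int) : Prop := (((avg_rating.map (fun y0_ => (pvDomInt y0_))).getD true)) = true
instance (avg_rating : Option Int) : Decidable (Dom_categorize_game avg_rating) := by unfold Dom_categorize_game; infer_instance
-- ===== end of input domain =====

-- B replaces A's linear scan over the range dict (plus the 'expert' fallback) by a
-- binary search over a sorted boundary list indexing a parallel category table.
-- ===== PORT A =====
def eloRanges : PySem.Dict String (Int × Int) :=
  PySem.Dict.ofList
    [("beginner", (750, 1500)), ("intermediate", (1500, 2400)),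
     ("expert", (2400, 3000)), ("computer", (3000, 4000))]

def categorizeLoop (r : Int) : List (String × (Int × Int)) → Option String
  | [] =>
      -- after the loop: if avg_rating >= ELO_RANGES['expert'][0] return 'expert' else None
      if r ≥ (PySem.Dict.getD eloRanges "expert" ((0 : Int), (0 : Int))).1 then some "expert" else none
  | (cat, (mn, mx)) :: rest =>
      if mn ≤ r ∧ r < mx then some cat else categorizeLoop r rest

def categorize_game (avg_rating : Option Int) : Option String :=
  match avg_rating with
  | none => none
  | some r => categorizeLoop r eloRanges.items

-- ===== PORT B =====
def altBoundaries : List Int := [750, 1500, 2400, 3000, 4000]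
def altCategories : List (Option String) :=
  [none, some "beginner", some "intermediate", some "expert", some "computer", some "expert"]

def altBisect (r : Int) (lo hi : Nat) : Nat :=
  if lo < hi then
    let mid := (lo + hi) / 2
    if r < altBoundaries.getD mid 0 then altBisect r lo mid
    else altBisect r (mid + 1) hi
  else lo
termination_by hi - lo
decreasing_by all_goals omega

def categorize_game_alt (avg_rating : Option Int) : Option String :=
  match avg_rating with
  | none => none
  | some r => altCategories.getD (altBisect r 0 altBoundaries.length) none

-- ===== PRECONDITION & SPEC =====
def Spec_categorize_game (avg_rating : Option Int) (out : Option String) : Prop := out = categorize_game_alt avg_rating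
instance (avg_rating : Option Int) (out : Option String) : Decidable (Spec_categorize_game avg_rating out) := by unfold Spec_categorize_game; infer_instance

-- ===== CLAIM (what is proved, stated in full; the proofs are below) =====
def Claim_equal_categorize_game : Prop := ∀ (avg_rating : Option Int), Dom_categorize_game avg_rating → Spec_categorize_game avg_rating (categorize_game avg_rating)

-- ===== LEMMAS AND PROOFS =====
theorem a_norm (r : Int) : categorize_game (some r) =
    (if 750 ≤ r ∧ r < 1500 then some "beginner"
     else if 1500 ≤ r ∧ r < 2400 then some "intermediate"
     else if 2400 ≤ r ∧ r < 3000 then some "expert"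
     else if 3000 ≤ r ∧ r < 4000 then some "computer"
     else if 2400 ≤ r then some "expert" else none) := rfl

theorem bis_step (r : Int) (lo hi : Nat) (h : lo < hi) :
    altBisect r lo hi =
      if r < altBoundaries.getD ((lo + hi) / 2) 0 then altBisect r lo ((lo + hi) / 2)
      else altBisect r (((lo + hi) / 2) + 1) hi := by
  rw [altBisect]; simp [h]

theorem bis_base (r : Int) (lo : Nat) : altBisect r lo lo = lo := by
  rw [altBisect]; simp

theorem b_norm (r : Int) : categorize_game_alt (some r) =
    (if r < 2400 then (if r < 1500 then (if r < 750 then none else some "beginner") else some "intermediate")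
     else if r < 4000 then (if r < 3000 then some "expert" else some "computer") else some "expert") := by
  show altCategories.getD (altBisect r 0 5) none = _
  rw [bis_step r 0 5 (by norm_num), bis_step r 0 2 (by norm_num), bis_step r 0 1 (by norm_num),
      bis_step r 3 5 (by norm_num), bis_step r 3 4 (by norm_num),
      bis_base, bis_base, bis_base, bis_base, bis_base, bis_base]
  simp only [altBoundaries, altCategories]
  norm_num
  split_ifs <;> rfl

-- ===== VERDICT (by name: the statement is the Claim_ definition above) =====
theorem categorize_game_spec : Claim_equal_categorize_game := by
  intro a _
  unfold Spec_categorize_game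
  cases a with
  | none => rfl
  | some r =>
    rw [a_norm, b_norm]
    split_ifs <;> first | rfl | omega
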